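-- pv_equiv track=rewrite | github.com/pedrossdemelo/DSA-exercises | leetcode/Solving Questions With Brainpower.py | mostPoints
-- ===== SOURCE A (Python) =====
-- def mostPoints(questions):
--     n = len(questions)
--     best_starting_at = [0] * (n + 1)
--     for i in range(n - 1, -1, -1):
--         points, brainpower = questions[i]
--         score_if_answer = points + best_starting_at[min(n, i + 1 + brainpower)]
--         score_if_skip = best_starting_at[min(n, i + 1)]
--         best_starting_at[i] = max(score_if_answer, score_if_skip)
--     return best_starting_at[0]
--
-- questions = [[3,2],[4,3],[4,4],[2,5]]
-- ===== SOURCE B (Python) =====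
-- def mostPoints(questions):
--     # forward push DP: dp[i] = best score achievable having resolved questions [0, i)
--     n = len(questions)
--     dp = [0] * (n + 1)
--     for i, (points, brainpower) in enumerate(questions):
--         if dp[i] > dp[i + 1]:
--             dp[i + 1] = dp[i]
--         j = min(n, i + 1 + brainpower)
--         gain = dp[i] + points
--         if gain > dp[j]:
--             dp[j] = gain
--     return dp[n]
-- ===== Notes on version B (the rewrite author's own statement) =====
-- stated objective: alternative
-- what changed: Replaced A's backward pull DP (best_starting_at[i] computed from later entries, iterating i from n-1 down) by a forward push DP: dp[i] is the best score having resolved questions [0,i); each step propagates the skip into dp[i+1] and pushes the answer value to the clamped target dp[min(n, i+1+brainpower)], returning dp[n].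
-- outside the precondition, e.g. on mostPoints([(5, -1)]): A returns 5, B returns 0
import Mathlib
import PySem

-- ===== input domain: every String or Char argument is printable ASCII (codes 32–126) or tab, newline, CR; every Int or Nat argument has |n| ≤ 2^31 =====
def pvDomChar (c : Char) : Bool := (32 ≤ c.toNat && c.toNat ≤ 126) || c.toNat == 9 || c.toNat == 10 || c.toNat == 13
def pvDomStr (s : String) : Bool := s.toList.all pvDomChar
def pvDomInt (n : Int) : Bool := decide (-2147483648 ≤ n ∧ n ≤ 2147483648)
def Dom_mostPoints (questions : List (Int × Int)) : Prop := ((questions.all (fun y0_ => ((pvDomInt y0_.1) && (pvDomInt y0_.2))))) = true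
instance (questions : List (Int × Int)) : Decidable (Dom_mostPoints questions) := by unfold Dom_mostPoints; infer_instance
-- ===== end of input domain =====

-- B replaces A's backward pull DP by a forward push DP over a dp table of resolved prefixes (alternative decomposition, same O(n) cost).

-- ===== PORT A =====
-- backward pull DP: best_starting_at[i] from later entries, i = n-1 … 0
def mostPoints (questions : List (Int × Int)) : Int :=
  let n : Int := questions.length
  let best0 : List Int := List.replicate (questions.length + 1) 0
  let best := (PySem.List.pyRange (n - 1) (-1) (-1)).foldl
    (fun best i =>
      let q := PySem.List.pyGetD questions i (0, 0)
      let scoreAns := q.1 + PySem.List.pyGetD best (min n (i + 1 + q.2)) 0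
      let scoreSkip := PySem.List.pyGetD best (min n (i + 1)) 0
      PySem.List.pySetD best i (max scoreAns scoreSkip))
    best0
  PySem.List.pyGetD best 0 0

-- ===== PORT B =====
-- forward push DP: dp[i] = best score having resolved questions [0, i)
def mostPoints_alt (questions : List (Int × Int)) : Int :=
  let n : Int := questions.length
  let dp0 : List Int := List.replicate (questions.length + 1) 0
  let dp := (PySem.List.enumerate questions).foldl
    (fun dp iq =>
      let i := iq.1
      let points := iq.2.1
      let brainpower := iq.2.2
      let dp := if PySem.List.pyGetD dp i 0 > PySem.List.pyGetD dp (i + 1) 0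
                then PySem.List.pySetD dp (i + 1) (PySem.List.pyGetD dp i 0) else dp
      let j := min n (i + 1 + brainpower)
      let gain := PySem.List.pyGetD dp i 0 + points
      if gain > PySem.List.pyGetD dp j 0 then PySem.List.pySetD dp j gain else dp)
    dp0
  PySem.List.pyGetD dp n 0

-- ===== PRECONDITION & SPEC =====
-- Pre_ restricts to the problem's natural domain (LeetCode guarantees brainpower ≥ 1): on a
-- negative brainpower A still returns, but its value comes from stale-zero / wrapped negative
-- index reads of the half-filled table, which is outside the function's meaning.
def Pre_mostPoints (questions : List (Int × Int)) : Prop :=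
  ∀ q ∈ questions, 0 ≤ q.2
instance (questions : List (Int × Int)) : Decidable (Pre_mostPoints questions) := by
  unfold Pre_mostPoints; infer_instance

def pvWitness_mostPoints : (List (Int × Int)) := [(3, 2), (4, 3), (4, 4), (2, 5)]

def Spec_mostPoints (questions : List (Int × Int)) (out : Int) : Prop := out = mostPoints_alt questions
instance (questions : List (Int × Int)) (out : Int) : Decidable (Spec_mostPoints questions out) := by unfold Spec_mostPoints; infer_instance

-- ===== CLAIM (what is proved, stated in full; the proofs are below) =====
def Claim_equal_mostPoints : Prop := ∀ (questions : List (Int × Int)), Dom_mostPoints questions → Pre_mostPoints questions → Spec_mostPoints questions (mostPoints questions)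

-- ===== LEMMAS AND PROOFS =====

-- the common specification: optimal score of a suffix, by structural recursion
def pvOpt : List (Int × Int) → Int
  | [] => 0
  | q :: rest => max (q.1 + pvOpt (rest.drop q.2.toNat)) (pvOpt rest)
termination_by l => l.length
decreasing_by
  · simp only [List.length_drop, List.length_cons]; omega
  · simp only [List.length_cons]; omega

lemma pvOpt_nil : pvOpt [] = 0 := by rw [pvOpt]

lemma pvOpt_cons (q : Int × Int) (rest : List (Int × Int)) :
    pvOpt (q :: rest) = max (q.1 + pvOpt (rest.drop q.2.toNat)) (pvOpt rest) := by
  rw [pvOpt]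

lemma pvOpt_drop_clamp (l : List (Int × Int)) (k : Nat) :
    l.drop (min l.length k) = l.drop k := by
  rcases le_total l.length k with h | h
  · rw [min_eq_left h, List.drop_of_length_le h, List.drop_of_length_le le_rfl]
  · rw [min_eq_right h]

-- getD after set, and set across an append (plumbing for both loops)
lemma pvGetD_set (l : List Int) (i k : Nat) (v : Int) (hi : i < l.length) :
    (l.set i v).getD k 0 = if k = i then v else l.getD k 0 := by
  rcases eq_or_ne k i with h | h
  · subst h; simp [List.getD, List.getElem?_set_self hi]
  · simp [List.getD, List.getElem?_set_ne h.symm, h]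

lemma pvSet_append (pre ys : List Int) (k : Nat) (v : Int) :
    (pre ++ ys).set (pre.length + k) v = pre ++ ys.set k v := by
  induction pre with
  | nil => simp
  | cons a pre ih => simp [Nat.succ_add, ih]

-- max-update of one cell, in the exact if-shape both loops use
def pvBump (s : List Int) (k : Nat) (v : Int) : List Int :=
  if v > s.getD k 0 then s.set k v else s

lemma pvBump_length (s : List Int) (k : Nat) (v : Int) :
    (pvBump s k v).length = s.length := by
  unfold pvBump; split <;> simp

-- payoff s qs = max over k of s[k] + pvOpt (qs.drop k)  (|s| = |qs| + 1)
def pvPayoff : List Int → List (Int × Int) → Int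
  | [x], qs => x + pvOpt qs
  | x :: y :: rest, qs => max (x + pvOpt qs) (pvPayoff (y :: rest) qs.tail)
  | [], _ => 0

lemma pvPayoff_cons (x : Int) (m : List Int) (qs : List (Int × Int)) (hm : m ≠ []) :
    pvPayoff (x :: m) qs = max (x + pvOpt qs) (pvPayoff m qs.tail) := by
  rcases m with _ | ⟨y, rest⟩
  · exact absurd rfl hm
  · rw [pvPayoff]

lemma pvPayoff_singleton (x : Int) (qs : List (Int × Int)) :
    pvPayoff [x] qs = x + pvOpt qs := by rw [pvPayoff]

-- bumping cell k adds the candidate v + opt (drop k qs)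
lemma pvPayoff_bump (s : List Int) (qs : List (Int × Int)) (k : Nat) (v : Int)
    (hlen : s.length = qs.length + 1) (hk : k < s.length) :
    pvPayoff (pvBump s k v) qs = max (pvPayoff s qs) (v + pvOpt (qs.drop k)) := by
  induction s generalizing qs k with
  | nil => simp at hlen
  | cons x m ih =>
    rcases m with _ | ⟨y, rest⟩
    · -- s = [x], so k = 0 and qs = []
      have hk0 : k = 0 := by simp at hk; omega
      subst hk0
      have hqs : qs = [] := by
        simpa using List.eq_nil_of_length_eq_zero (by simpa using hlen.symm)
      subst hqs
      unfold pvBump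
      simp only [List.getD, List.getElem?_cons_zero, Option.getD_some, List.set_cons_zero,
        List.drop_zero]
      split <;> simp only [pvPayoff_singleton, pvOpt_nil] <;> omega
    · -- s = x :: y :: rest
      rcases k with _ | k
      · -- k = 0
        unfold pvBump
        simp only [List.getD, List.getElem?_cons_zero, Option.getD_some, List.set_cons_zero,
          List.drop_zero]
        split <;> simp only [pvPayoff] <;> omega
      · -- k = k'+1: bump goes into the tail
        have hqsne : qs ≠ [] := by intro h; subst h; simp at hlen
        have hbump : pvBump (x :: y :: rest) (k + 1) v = x :: pvBump (y :: rest) k v := by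
          unfold pvBump
          simp only [List.getD, List.getElem?_cons_succ, List.set_cons_succ]
          split <;> rfl
        have htail : qs.tail.drop k = qs.drop (k + 1) := by
          rcases qs with _ | ⟨a, qs⟩ <;> simp
        rw [hbump,
            pvPayoff_cons _ _ _ (by
              intro h
              have := pvBump_length (y :: rest) k v
              rw [h] at this; simp at this),
            pvPayoff_cons _ _ _ (by simp),
            ih qs.tail k (by rcases qs with _ | ⟨a, qs'⟩ <;> simp_all) (by simpa using hk),
            htail]
        omega

-- the relative form of B's loop: state = dp[i..n], head = current best
def pvRelLoop : List (Int × Int) → List Int → Int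
  | [], s => s.getD 0 0
  | q :: qs, s =>
    match s with
    | [] => 0
    | c :: rest =>
      pvRelLoop qs (pvBump (pvBump rest 0 c) (min (rest.length - 1) q.2.toNat) (c + q.1))

lemma pvRelLoop_nil (s : List Int) : pvRelLoop [] s = s.getD 0 0 := by rw [pvRelLoop]

lemma pvRelLoop_cons (q : Int × Int) (qs : List (Int × Int)) (c : Int) (rest : List Int) :
    pvRelLoop (q :: qs) (c :: rest)
      = pvRelLoop qs (pvBump (pvBump rest 0 c) (min (rest.length - 1) q.2.toNat) (c + q.1)) := by
  rw [pvRelLoop]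

-- B's relative loop computes the payoff of its state
lemma pvRelLoop_payoff (qs : List (Int × Int)) (s : List Int)
    (hlen : s.length = qs.length + 1) :
    pvRelLoop qs s = pvPayoff s qs := by
  induction qs generalizing s with
  | nil =>
    rcases s with _ | ⟨c, rest⟩
    · simp at hlen
    · have : rest = [] := by simpa using hlen
      subst this
      rw [pvRelLoop_nil, pvPayoff_singleton, pvOpt_nil]
      simp [List.getD]
  | cons q qs ih =>
    rcases s with _ | ⟨c, rest⟩
    · simp at hlen
    · have hrest : rest.length = qs.length + 1 := by simpa using hlen
      have hrne : rest ≠ [] := by intro h; rw [h] at hrest; simp at hrest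
      rw [pvRelLoop_cons]
      have h1len : (pvBump rest 0 c).length = qs.length + 1 := by
        rw [pvBump_length]; exact hrest
      rw [ih _ (by rw [pvBump_length]; exact h1len)]
      rw [pvPayoff_bump _ _ _ _ h1len (by rw [pvBump_length]; omega)]
      rw [pvPayoff_bump _ _ _ _ hrest (by omega)]
      have hdrop : qs.drop (min (rest.length - 1) q.2.toNat) = qs.drop q.2.toNat := by
        have h : rest.length - 1 = qs.length := by omega
        rw [h, pvOpt_drop_clamp]
      rw [hdrop, pvPayoff_cons _ _ _ hrne]
      simp only [List.drop_zero, List.tail_cons, pvOpt_cons]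
      omega

-- a zero state's payoff is the optimum (skipping is free)
lemma pvOpt_tail_le (q : Int × Int) (rest : List (Int × Int)) :
    pvOpt rest ≤ pvOpt (q :: rest) := by
  rw [pvOpt_cons]; exact le_max_right _ _

lemma pvPayoff_zeros (qs : List (Int × Int)) :
    pvPayoff (List.replicate (qs.length + 1) 0) qs = pvOpt qs := by
  induction qs with
  | nil => simp [pvPayoff_singleton, pvOpt_nil, List.replicate]
  | cons q qs ih =>
    rw [show (q :: qs).length + 1 = (qs.length + 1) + 1 by simp, List.replicate_succ,
      pvPayoff_cons _ _ _ (by simp), List.tail_cons, ih]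
    have := pvOpt_tail_le q qs
    omega

-- ===== bridging B's absolute fold to the relative loop =====

def pvStepB (n : Int) (dp : List Int) (iq : Int × (Int × Int)) : List Int :=
  let i := iq.1
  let points := iq.2.1
  let brainpower := iq.2.2
  let dp := if PySem.List.pyGetD dp i 0 > PySem.List.pyGetD dp (i + 1) 0
            then PySem.List.pySetD dp (i + 1) (PySem.List.pyGetD dp i 0) else dp
  let j := min n (i + 1 + brainpower)
  let gain := PySem.List.pyGetD dp i 0 + points
  if gain > PySem.List.pyGetD dp j 0 then PySem.List.pySetD dp j gain else dp

lemma pvGetD_append_k (pre ys : List Int) (k : Nat) :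
    PySem.List.pyGetD (pre ++ ys) ((pre.length : Int) + (k : Int)) 0 = ys.getD k 0 := by
  unfold PySem.List.pyGetD
  rw [PySem.List.pyGet?_append_right]
  simp [List.getD]

lemma pvGetD_append_zero (pre ys : List Int) :
    PySem.List.pyGetD (pre ++ ys) (pre.length : Int) 0 = ys.getD 0 0 := by
  have := pvGetD_append_k pre ys 0
  simpa using this

lemma pvGetD_zero (xs : List Int) : PySem.List.pyGetD xs 0 0 = xs.getD 0 0 := by
  have := pvGetD_append_zero [] xs
  simpa using this

lemma pvGetD_natCast (xs : List Int) (k : Nat) :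
    PySem.List.pyGetD xs (k : Int) 0 = xs.getD k 0 := by
  unfold PySem.List.pyGetD
  rw [PySem.List.pyGet?_natCast]
  simp [List.getD]

lemma pvSetD_append_k (pre ys : List Int) (k : Nat) (v : Int) :
    PySem.List.pySetD (pre ++ ys) ((pre.length : Int) + (k : Int)) v = pre ++ ys.set k v := by
  have hcast : ((pre.length : Int) + (k : Int)) = ((pre.length + k : Nat) : Int) := by
    push_cast; ring
  rw [hcast, PySem.List.pySetD_natCast, pvSet_append]

-- one absolute step of B equals the relative bump-bump step
lemma pvStepB_rel (n : Int) (pre : List Int) (c : Int) (rest : List Int)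
    (q : Int × Int) (hq : 0 ≤ q.2) (hn : n = (pre.length : Int) + (rest.length : Int))
    (hrne : rest ≠ []) :
    pvStepB n (pre ++ c :: rest) ((pre.length : Int), q) =
      (pre ++ [c]) ++ pvBump (pvBump rest 0 c) (min (rest.length - 1) q.2.toNat) (c + q.1) := by
  rcases rest with _ | ⟨r0, rest'⟩
  · exact absurd rfl hrne
  unfold pvStepB
  simp only
  have hget_i : PySem.List.pyGetD (pre ++ c :: r0 :: rest') ((pre.length : Int)) 0 = c :=
    pvGetD_append_zero pre (c :: r0 :: rest')
  have hget_i1 : PySem.List.pyGetD (pre ++ c :: r0 :: rest') ((pre.length : Int) + 1) 0 = r0 := by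
    have := pvGetD_append_k pre (c :: r0 :: rest') 1
    simpa using this
  rw [hget_i, hget_i1]
  -- the propagated state: pre ++ c :: pvBump (r0 :: rest') 0 c
  have hprop : (if c > r0 then PySem.List.pySetD (pre ++ c :: r0 :: rest') ((pre.length : Int) + 1) c
        else pre ++ c :: r0 :: rest') = pre ++ c :: pvBump (r0 :: rest') 0 c := by
    unfold pvBump
    simp only [List.getD, List.getElem?_cons_zero, Option.getD_some, List.set_cons_zero]
    split
    · have := pvSetD_append_k pre (c :: r0 :: rest') 1 c
      simpa using this
    · rfl
  rw [hprop]
  set rest₁ := pvBump (r0 :: rest') 0 c with hrest₁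
  have hlen₁ : rest₁.length = rest'.length + 1 := by rw [hrest₁, pvBump_length]; simp
  set r : Nat := min ((r0 :: rest').length - 1) q.2.toNat with hrdef
  -- relative push index
  have hr : min n ((pre.length : Int) + 1 + q.2) = (pre.length : Int) + 1 + (r : Int) := by
    rw [hrdef]
    have h1 : ((r0 :: rest').length - 1 : Nat) = rest'.length := by simp
    have h2 : ((r0 :: rest').length : Int) = (rest'.length : Int) + 1 := by simp
    rw [h1]
    rw [h2] at hn
    have hcast : ((min rest'.length q.2.toNat : Nat) : Int) = min (rest'.length : Int) q.2 := by
      rcases le_total rest'.length q.2.toNat with h | h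
      · rw [min_eq_left h, min_eq_left (by omega)]
      · rw [min_eq_right h, min_eq_right (by omega)]
        omega
    rw [hcast]
    rcases le_total (rest'.length : Int) q.2 with h | h
    · rw [min_eq_left (by omega), min_eq_left h]
      omega
    · rw [min_eq_right (by omega), min_eq_right h]
  have hget_i' : PySem.List.pyGetD (pre ++ c :: rest₁) ((pre.length : Int)) 0 = c :=
    pvGetD_append_zero pre (c :: rest₁)
  rw [hr, hget_i']
  have hget_j : PySem.List.pyGetD (pre ++ c :: rest₁) ((pre.length : Int) + 1 + (r : Int)) 0
      = rest₁.getD r 0 := by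
    have h := pvGetD_append_k pre (c :: rest₁) (1 + r)
    rw [show (pre.length : Int) + 1 + (r : Int) = (pre.length : Int) + ((1 + r : Nat) : Int) by
      push_cast; ring]
    rw [h]
    simp [List.getD, Nat.add_comm 1 r]
  rw [hget_j]
  unfold pvBump
  split
  · have h := pvSetD_append_k pre (c :: rest₁) (1 + r) (c + q.1)
    rw [show (pre.length : Int) + 1 + (r : Int) = (pre.length : Int) + ((1 + r : Nat) : Int) by
      push_cast; ring]
    rw [h]
    simp [Nat.add_comm 1 r]
  · simp

-- the whole fold, relativized
lemma pvFoldB (n : Int) (qs : List (Int × Int)) :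
    ∀ (pre : List Int) (c : Int) (rest : List Int),
    (∀ q ∈ qs, 0 ≤ q.2) → rest.length = qs.length → n = (pre.length : Int) + (qs.length : Int) →
    PySem.List.pyGetD ((PySem.List.enumerate qs (pre.length : Int)).foldl (pvStepB n)
        (pre ++ c :: rest)) n 0 = pvRelLoop qs (c :: rest) := by
  induction qs with
  | nil =>
    intro pre c rest _ hlen hn
    have : rest = [] := List.eq_nil_of_length_eq_zero (by simpa using hlen)
    subst this
    rw [PySem.List.enumerate_nil]
    simp only [List.foldl_nil]
    rw [show n = (pre.length : Int) by simp only [List.length_nil, Nat.cast_zero] at hn; omega]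
    rw [pvGetD_append_zero, pvRelLoop_nil]
  | cons q qs ih =>
    intro pre c rest hpre hlen hn
    rw [PySem.List.enumerate_cons]
    simp only [List.foldl_cons]
    have hrne : rest ≠ [] := by
      intro h; rw [h] at hlen; simp at hlen
    rw [pvStepB_rel n pre c rest q (hpre q (by simp)) (by
        simp only [List.length_cons] at hn hlen
        push_cast at hn ⊢
        omega) hrne]
    have hlen₂ : (pvBump (pvBump rest 0 c) (min (rest.length - 1) q.2.toNat) (c + q.1)).length
        = rest.length := by rw [pvBump_length, pvBump_length]
    rcases hrest₂ : pvBump (pvBump rest 0 c) (min (rest.length - 1) q.2.toNat) (c + q.1)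
      with _ | ⟨c', rest''⟩
    · exfalso
      rw [hrest₂] at hlen₂
      simp only [List.length_cons] at hlen
      simp at hlen₂
      omega
    · have hlen' : rest''.length = qs.length := by
        rw [hrest₂] at hlen₂
        simp only [List.length_cons] at hlen₂ hlen
        omega
      have hstart : (pre.length : Int) + 1 = (((pre ++ [c]).length : Nat) : Int) := by
        simp
      rw [show (pre ++ [c]) ++ c' :: rest'' = (pre ++ [c]) ++ c' :: rest'' from rfl, hstart,
        ih (pre ++ [c]) c' rest'' (fun a ha => hpre a (List.mem_cons_of_mem _ ha)) hlen' (by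
          simp only [List.length_append, List.length_cons, List.length_nil] at hn ⊢
          push_cast at hn ⊢
          omega)]
      rw [pvRelLoop_cons, hrest₂]

-- B computes pvOpt
lemma pvAltEqOpt (qs : List (Int × Int)) (hpre : ∀ q ∈ qs, 0 ≤ q.2) :
    mostPoints_alt qs = pvOpt qs := by
  show PySem.List.pyGetD ((PySem.List.enumerate qs).foldl _ (List.replicate (qs.length + 1) 0))
      (qs.length : Int) 0 = pvOpt qs
  have hfold : ∀ dp0, (PySem.List.enumerate qs).foldl
      (fun dp iq =>
        let i := iq.1
        let points := iq.2.1
        let brainpower := iq.2.2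
        let dp := if PySem.List.pyGetD dp i 0 > PySem.List.pyGetD dp (i + 1) 0
                  then PySem.List.pySetD dp (i + 1) (PySem.List.pyGetD dp i 0) else dp
        let j := min ((qs.length : Int)) (i + 1 + brainpower)
        let gain := PySem.List.pyGetD dp i 0 + points
        if gain > PySem.List.pyGetD dp j 0 then PySem.List.pySetD dp j gain else dp) dp0
      = (PySem.List.enumerate qs).foldl (pvStepB (qs.length : Int)) dp0 := by
    intro dp0; rfl
  rw [hfold]
  have hrep : List.replicate (qs.length + 1) (0 : Int)
      = [] ++ (0 : Int) :: List.replicate qs.length 0 := by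
    rw [List.replicate_succ]; rfl
  rw [hrep]
  have h := pvFoldB (qs.length : Int) qs [] 0 (List.replicate qs.length 0) hpre
    (by simp) (by simp)
  rw [show ((List.length ([] : List Int) : Nat) : Int) = 0 from by simp] at h
  rw [h, pvRelLoop_payoff _ _ (by simp)]
  simpa [List.replicate_succ] using pvPayoff_zeros qs

-- ===== A's backward fold =====

def pvStepA (qs : List (Int × Int)) (best : List Int) (i : Int) : List Int :=
  let q := PySem.List.pyGetD qs i (0, 0)
  let scoreAns := q.1 + PySem.List.pyGetD best (min (qs.length : Int) (i + 1 + q.2)) 0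
  let scoreSkip := PySem.List.pyGetD best (min (qs.length : Int) (i + 1)) 0
  PySem.List.pySetD best i (max scoreAns scoreSkip)

-- invariant: entries at indices ≥ m hold the suffix optima
lemma pvFoldA (qs : List (Int × Int)) (hpre : ∀ q ∈ qs, 0 ≤ q.2) :
    ∀ (m : Nat) (best : List Int), m ≤ qs.length → best.length = qs.length + 1 →
    (∀ k : Nat, m ≤ k → k ≤ qs.length → best.getD k 0 = pvOpt (qs.drop k)) →
    PySem.List.pyGetD ((PySem.List.pyRange ((m : Int) - 1) (-1) (-1)).foldl (pvStepA qs) best) 0 0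
      = pvOpt qs := by
  intro m
  induction m with
  | zero =>
    intro best _ hlen hinv
    rw [PySem.List.pyRange_neg_one_eq_nil (by omega)]
    simp only [List.foldl_nil]
    rw [pvGetD_zero]
    simpa using hinv 0 (le_refl 0) (by omega)
  | succ m ih =>
    intro best hm hlen hinv
    rw [show ((m + 1 : Nat) : Int) - 1 = (m : Int) by push_cast; ring,
      PySem.List.pyRange_neg_one_cons (by omega)]
    simp only [List.foldl_cons]
    have hmlt : m < qs.length := by omega
    apply ih _ (by omega) _ _
    · -- length preserved
      unfold pvStepA
      rw [PySem.List.length_pySetD]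
      exact hlen
    · -- invariant re-established for m
      intro k hk hkn
      unfold pvStepA
      have hq : PySem.List.pyGetD qs (m : Int) (0, 0) = qs[m] := by
        unfold PySem.List.pyGetD
        rw [PySem.List.pyGet?_natCast]
        simp [List.getElem?_eq_getElem hmlt]
      have hb : 0 ≤ (qs[m]).2 := hpre _ (List.getElem_mem hmlt)
      have hset : ∀ v, (PySem.List.pySetD best (m : Int) v).getD k 0
          = if k = m then v else best.getD k 0 := by
        intro v
        rw [PySem.List.pySetD_natCast]
        exact pvGetD_set best m k v (by omega)
      simp only
      rw [hset]
      rcases eq_or_ne k m with h | h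
      · subst h
        rw [if_pos rfl, hq]
        -- compute the two reads
        have hidxAns : min (qs.length : Int) ((k : Int) + 1 + (qs[k]).2)
            = ((min qs.length (k + 1 + (qs[k]).2.toNat) : Nat) : Int) := by
          push_cast; omega
        have hidxSkip : min (qs.length : Int) ((k : Int) + 1) = (((k + 1 : Nat)) : Int) := by
          push_cast; omega
        rw [hidxAns, hidxSkip, pvGetD_natCast, pvGetD_natCast]
        have ha : best.getD (min qs.length (k + 1 + (qs[k]).2.toNat)) 0
            = pvOpt (qs.drop (min qs.length (k + 1 + (qs[k]).2.toNat))) :=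
          hinv _ (by omega) (by omega)
        have hs : best.getD (k + 1) 0 = pvOpt (qs.drop (k + 1)) :=
          hinv _ (by omega) (by omega)
        rw [ha, hs]
        have hdropAns : qs.drop (min qs.length (k + 1 + (qs[k]).2.toNat))
            = (qs.drop (k + 1)).drop (qs[k]).2.toNat := by
          rw [pvOpt_drop_clamp, List.drop_drop]
        rw [hdropAns]
        have hsplit : qs.drop k = qs[k] :: qs.drop (k + 1) :=
          List.drop_eq_getElem_cons hmlt
        rw [hsplit, pvOpt_cons]
      · rw [if_neg h]
        exact hinv k (by omega) hkn

-- A computes pvOpt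
lemma pvAEqOpt (qs : List (Int × Int)) (hpre : ∀ q ∈ qs, 0 ≤ q.2) :
    mostPoints qs = pvOpt qs := by
  show PySem.List.pyGetD ((PySem.List.pyRange ((qs.length : Int) - 1) (-1) (-1)).foldl _
      (List.replicate (qs.length + 1) 0)) 0 0 = pvOpt qs
  have hfold : ∀ b0, (PySem.List.pyRange ((qs.length : Int) - 1) (-1) (-1)).foldl
      (fun best i =>
        let q := PySem.List.pyGetD qs i (0, 0)
        let scoreAns := q.1 + PySem.List.pyGetD best (min ((qs.length : Int)) (i + 1 + q.2)) 0
        let scoreSkip := PySem.List.pyGetD best (min ((qs.length : Int)) (i + 1)) 0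
        PySem.List.pySetD best i (max scoreAns scoreSkip)) b0
      = (PySem.List.pyRange ((qs.length : Int) - 1) (-1) (-1)).foldl (pvStepA qs) b0 := by
    intro b0; rfl
  rw [hfold]
  apply pvFoldA qs hpre qs.length _ le_rfl (by simp)
  intro k hk hkn
  have hk' : k = qs.length := le_antisymm hkn hk
  subst hk'
  simp [List.getD, List.drop_length, pvOpt_nil]

-- ===== VERDICT (by name: the statement is the Claim_ definition above) =====
theorem mostPoints_spec : Claim_equal_mostPoints := by
  intro qs _ hpre
  show mostPoints qs = mostPoints_alt qs
  rw [pvAEqOpt qs hpre, pvAltEqOpt qs hpre]
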